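-- pv_equiv track=rewrite | github.com/Olle7/v-idete-algoritmiline-anal-simine | implementatsioon programmina/poolikud/seos_Oga.py | nimi
-- ===== SOURCE A (Python) =====
-- def nimi(p,u,e):
--     s="("
--     if p:
--         s+=str(p[0])
--     for predikaat in p[1:]:
--         s+=" & "+str(predikaat)+""
--     if u:
--         if p:
--             s+="&"
--         s+="¬∃("+str(u[0])+")"
--     for uk in u[1:]:
--         s+="&¬∃("+str(uk)+")"
--     if e:
--         if p or u:
--             s+="&"
--         s+="∃("+str(e[0])+")"
--     for ek in e[1:]:
--         s+="&∃("+str(ek)+")"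
--     return s+")"
-- ===== SOURCE B (Python) =====
-- def nimi(p, u, e):
--     groups = [
--         (p, " & ".join(str(x) for x in p)),
--         (u, "&".join("\u00ac\u2203(" + str(x) + ")" for x in u)),
--         (e, "&".join("\u2203(" + str(x) + ")" for x in e)),
--     ]
--     return "(" + "&".join(g for lst, g in groups if lst) + ")"
-- ===== Notes on version B (the rewrite author's own statement) =====
-- stated objective: simpler
-- what changed: B builds the three predicate groups independently as joined strings and joins the non-empty groups with '&', replacing A's single stateful accumulator with its 'if p', 'if p or u' separator branches.
import Mathlib
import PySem

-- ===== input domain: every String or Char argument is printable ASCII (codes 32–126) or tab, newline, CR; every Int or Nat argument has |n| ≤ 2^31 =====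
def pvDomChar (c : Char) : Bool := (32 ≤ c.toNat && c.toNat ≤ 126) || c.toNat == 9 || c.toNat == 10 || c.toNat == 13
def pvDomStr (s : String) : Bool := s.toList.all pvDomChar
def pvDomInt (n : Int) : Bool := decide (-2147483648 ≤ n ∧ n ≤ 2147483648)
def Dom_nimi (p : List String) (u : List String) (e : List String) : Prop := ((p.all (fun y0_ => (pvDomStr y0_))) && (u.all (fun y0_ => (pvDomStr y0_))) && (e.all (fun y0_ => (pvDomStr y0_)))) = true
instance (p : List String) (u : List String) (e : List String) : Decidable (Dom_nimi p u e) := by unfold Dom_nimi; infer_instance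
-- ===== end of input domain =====

-- B builds the three groups independently and joins the non-empty ones with '&' (objective: simpler).

-- ===== PORT A =====
def nimi (p : List String) (u : List String) (e : List String) : String :=
  let s := "("
  let s := match p with
    | [] => s
    | x :: _ => s ++ x
  let s := (p.drop 1).foldl (fun s predikaat => s ++ (" & " ++ predikaat ++ "")) s
  let s := match u with
    | [] => s
    | x :: _ => (if p.isEmpty then s else s ++ "&") ++ ("¬∃(" ++ x ++ ")")
  let s := (u.drop 1).foldl (fun s uk => s ++ ("&¬∃(" ++ uk ++ ")")) s
  let s := match e with
    | [] => s
    | x :: _ => (if p.isEmpty && u.isEmpty then s else s ++ "&") ++ ("∃(" ++ x ++ ")")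
  let s := (e.drop 1).foldl (fun s ek => s ++ ("&∃(" ++ ek ++ ")")) s
  s ++ ")"

-- ===== PORT B =====
def nimi_alt (p : List String) (u : List String) (e : List String) : String :=
  let groups : List (List String × String) :=
    [(p, PySem.Str.join " & " p),
     (u, PySem.Str.join "&" (u.map (fun x => "¬∃(" ++ x ++ ")"))),
     (e, PySem.Str.join "&" (e.map (fun x => "∃(" ++ x ++ ")")))]
  "(" ++ PySem.Str.join "&" ((groups.filter (fun g => !g.1.isEmpty)).map Prod.snd) ++ ")"

-- ===== PRECONDITION & SPEC =====
def Spec_nimi (p : List String) (u : List String) (e : List String) (out : String) : Prop := out = nimi_alt p u e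
instance (p : List String) (u : List String) (e : List String) (out : String) : Decidable (Spec_nimi p u e out) := by unfold Spec_nimi; infer_instance

-- ===== CLAIM (what is proved, stated in full; the proofs are below) =====
def Claim_equal_nimi : Prop := ∀ (p : List String) (u : List String) (e : List String), Dom_nimi p u e → Spec_nimi p u e (nimi p u e)

-- ===== LEMMAS AND PROOFS =====

theorem pvStep1 (acc y : String) : acc ++ (" & " ++ y ++ "") = acc ++ (" & " ++ y) := by
  rw [← String.toList_inj]; simp

theorem pvStep2 (acc y : String) :
    acc ++ ("&¬∃(" ++ y ++ ")") = acc ++ ("&" ++ ("¬∃(" ++ y ++ ")")) := by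
  rw [← String.toList_inj]; simp

theorem pvStep3 (acc y : String) :
    acc ++ ("&∃(" ++ y ++ ")") = acc ++ ("&" ++ ("∃(" ++ y ++ ")")) := by
  rw [← String.toList_inj]; simp

-- A's "first element, then '&sep'-prefixed rest" accumulator equals a separator join of the mapped list.
theorem pvFoldlJoin (sep : String) (f : String → String) :
    ∀ (l : List String) (a s : String),
      List.foldl (fun acc y => acc ++ (sep ++ f y)) (s ++ f a) l
        = s ++ PySem.Str.join sep (f a :: l.map f) := by
  intro l
  induction l with
  | nil =>
      intro a s
      rw [← String.toList_inj]
      simp [PySem.Str.toList_join, PySem.Chars.join_singleton]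
  | cons b t ih =>
      intro a s
      have h1 : (s ++ f a) ++ (sep ++ f b) = (s ++ f a ++ sep) ++ f b := by
        rw [← String.toList_inj]; simp
      calc List.foldl (fun acc y => acc ++ (sep ++ f y)) (s ++ f a) (b :: t)
          = List.foldl (fun acc y => acc ++ (sep ++ f y)) ((s ++ f a ++ sep) ++ f b) t := by
            simp only [List.foldl_cons, h1]
        _ = (s ++ f a ++ sep) ++ PySem.Str.join sep (f b :: t.map f) := ih b _
        _ = s ++ PySem.Str.join sep (f a :: (b :: t).map f) := by
            rw [← String.toList_inj]
            simp [PySem.Str.toList_join, PySem.Chars.join_cons_cons]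

-- ===== VERDICT (by name: the statement is the Claim_ definition above) =====
theorem nimi_spec : Claim_equal_nimi := by
  intro p u e _
  unfold Spec_nimi nimi nimi_alt
  rcases p with _ | ⟨p0, ps⟩ <;> rcases u with _ | ⟨u0, us⟩ <;> rcases e with _ | ⟨e0, es⟩ <;>
    simp only [List.drop_succ_cons, List.drop_nil, List.drop_zero, List.foldl_nil,
      List.isEmpty_nil, List.isEmpty_cons, List.filter, List.map, Bool.not_true,
      Bool.not_false, Bool.and_self, Bool.and_false, Bool.false_and, if_true, if_false,
      reduceCtorEq] <;>
    (try simp only [pvStep1, pvStep2, pvStep3]) <;>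
    (try simp only [pvFoldlJoin]) <;>
    (rw [← String.toList_inj];
     simp [PySem.Str.toList_join, PySem.Chars.join_singleton, PySem.Chars.join_cons_cons])
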